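-- pv_equiv track=rewrite | github.com/husticfilip/WebsitePhoneNumAndLogoExtractor | src/extractors/phone/phoneNumberExtractor.py | filter_on_number_contains_maximum_one_parenthesis_pair
-- ===== SOURCE A (Python) =====
-- from typing import List, Tuple
--
-- def filter_on_number_contains_maximum_one_parenthesis_pair(phone_number_candidates: List[str]) -> List[str]:
--     """
--     Function checks for valid usage of the parenthesis. Number should have only one open ( and one closed ) parenthesis.
--     Also if ( is present ) should come after it in a number
--
--     :param phone_number_candidates: list of phone number candidates
--     :return: list containing phone number candidates that passed the test
--     """
--     passed_candidates = []
--     for candidate in phone_number_candidates: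
--         open_parenthesis_positions = find_occurrences(candidate, '(')
--         close_parenthesis_positions = find_occurrences(candidate, ')')
--
--         # if there is no parenthesis then candidate passes filter
--         if len(open_parenthesis_positions) == 0 and len(close_parenthesis_positions) == 0:
--             passed_candidates.append(candidate)
--         # if number has one open and one closed parenthesis and position of open one is before closed one then
--         # candidate passes filter
--         elif len(open_parenthesis_positions) == 1 and len(close_parenthesis_positions) == 1 and \
--                 open_parenthesis_positions[0] < close_parenthesis_positions[0]:
--             passed_candidates.append(candidate)
--
--     return passed_candidates
--
-- def find_occurrences(string:str, match_char:str):
--     """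
--     :param string: string to find positions of letter in
--     :param match_char: letter for which to find positions in string
--     :return: list of positions on witch match_char is found in a string
--     """
--     return [index for index, char in enumerate(string) if char == match_char]
-- ===== SOURCE B (Python) =====
-- def filter_on_number_contains_maximum_one_parenthesis_pair(phone_number_candidates):
--     """
--     Split-based reformulation: cut each candidate at its first '(' with
--     str.partition; a candidate passes iff either there is no '(' and no ')'
--     at all, or the part before the '(' has no ')', the part after it has no
--     further '(' and contains exactly one ')' (checked by partitioning again).
--     """
--     passed_candidates = []
--     for candidate in phone_number_candidates:
--         head, sep, tail = candidate.partition('(')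
--         if not sep:
--             ok = ')' not in candidate
--         else:
--             _, sep2, after = tail.partition(')')
--             ok = (')' not in head) and ('(' not in tail) and bool(sep2) and (')' not in after)
--         if ok:
--             passed_candidates.append(candidate)
--     return passed_candidates
-- ===== Notes on version B (the rewrite author's own statement) =====
-- stated objective: faster
-- what changed: Replaces building two index-position lists per candidate (and length/first-index checks) with a split-based test: partition at the first '(' and decide by membership tests on the head/tail segments, partitioning the tail once more at its first ')'.
import Mathlib
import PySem

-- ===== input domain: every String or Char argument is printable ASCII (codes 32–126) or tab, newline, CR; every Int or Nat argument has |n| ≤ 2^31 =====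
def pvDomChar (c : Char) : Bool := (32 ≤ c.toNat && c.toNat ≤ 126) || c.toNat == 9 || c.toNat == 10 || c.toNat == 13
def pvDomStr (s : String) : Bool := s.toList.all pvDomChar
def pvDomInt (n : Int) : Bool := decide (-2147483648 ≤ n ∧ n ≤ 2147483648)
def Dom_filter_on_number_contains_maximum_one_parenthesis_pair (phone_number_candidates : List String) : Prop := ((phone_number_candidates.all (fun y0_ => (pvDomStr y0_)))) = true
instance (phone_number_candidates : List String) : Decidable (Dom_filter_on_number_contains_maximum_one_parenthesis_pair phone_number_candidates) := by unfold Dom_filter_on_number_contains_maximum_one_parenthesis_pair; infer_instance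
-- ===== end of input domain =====

-- B replaces A's two per-candidate index-position lists with a split-based test:
-- partition at the first '(' and decide by membership checks on the segments (objective: alternative).


-- ===== PORT A =====
-- [index for index, char in enumerate(string) if char == match_char]
def find_occurrences (string : List Char) (match_char : Char) : List Int :=
  (PySem.List.enumerate string 0).filterMap (fun p => if p.2 = match_char then some p.1 else none)

def filter_on_number_contains_maximum_one_parenthesis_pair (phone_number_candidates : List String) : List String :=
  phone_number_candidates.foldl (fun passed_candidates candidate =>
    let opens := find_occurrences candidate.toList '('
    let closes := find_occurrences candidate.toList ')'
    if opens.length = 0 ∧ closes.length = 0 then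
      passed_candidates ++ [candidate]
    -- opens[0] / closes[0] are guarded by the length-1 checks, so pyGetD is exact here
    else if opens.length = 1 ∧ closes.length = 1 ∧
        PySem.List.pyGetD opens 0 0 < PySem.List.pyGetD closes 0 0 then
      passed_candidates ++ [candidate]
    else passed_candidates) []

-- ===== PORT B =====
-- str.partition(ch): (part before first ch, whether ch occurred, part after it);
-- when ch is absent Python returns (s, '', ''), modelled here as (s, false, []) — exact.
def pvPartition (s : List Char) (ch : Char) : List Char × Bool × List Char :=
  match s with
  | [] => ([], false, [])
  | c :: t =>
    if c = ch then ([], true, t)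
    else
      let r := pvPartition t ch
      (c :: r.1, r.2.1, r.2.2)

-- the per-candidate test of Source B, step for step ('x in s' → List.contains)
def pvOk (candidate : String) : Bool :=
  let r := pvPartition candidate.toList '('
  if !r.2.1 then !(candidate.toList.contains ')')
  else
    let r2 := pvPartition r.2.2 ')'
    !(r.1.contains ')') && !(r.2.2.contains '(') && r2.2.1 && !(r2.2.2.contains ')')

def filter_on_number_contains_maximum_one_parenthesis_pair_alt (phone_number_candidates : List String) : List String :=
  phone_number_candidates.foldl (fun passed_candidates candidate =>
    if pvOk candidate then passed_candidates ++ [candidate] else passed_candidates) []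

-- ===== PRECONDITION & SPEC =====
def Spec_filter_on_number_contains_maximum_one_parenthesis_pair (phone_number_candidates : List String) (out : List String) : Prop := out = filter_on_number_contains_maximum_one_parenthesis_pair_alt phone_number_candidates
instance (phone_number_candidates : List String) (out : List String) : Decidable (Spec_filter_on_number_contains_maximum_one_parenthesis_pair phone_number_candidates out) := by unfold Spec_filter_on_number_contains_maximum_one_parenthesis_pair; infer_instance

-- ===== CLAIM (what is proved, stated in full; the proofs are below) =====
def Claim_equal_filter_on_number_contains_maximum_one_parenthesis_pair : Prop := ∀ (phone_number_candidates : List String), Dom_filter_on_number_contains_maximum_one_parenthesis_pair phone_number_candidates → Spec_filter_on_number_contains_maximum_one_parenthesis_pair phone_number_candidates (filter_on_number_contains_maximum_one_parenthesis_pair phone_number_candidates)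

-- ===== LEMMAS AND PROOFS =====

-- occurrence indices of ch in l, starting at offset n (A's helper with an explicit offset)
def pvOcc (l : List Char) (n : Int) (ch : Char) : List Int :=
  match l with
  | [] => []
  | c :: t => if c = ch then n :: pvOcc t (n + 1) ch else pvOcc t (n + 1) ch

lemma find_occ_eq (l : List Char) (n : Int) (ch : Char) :
    (PySem.List.enumerate l n).filterMap (fun p => if p.2 = ch then some p.1 else none) =
      pvOcc l n ch := by
  induction l generalizing n with
  | nil => simp [PySem.List.enumerate_nil, pvOcc]
  | cons c t ih =>
    rw [PySem.List.enumerate_cons, List.filterMap_cons]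
    by_cases h : c = ch <;> simp [pvOcc, h, ih]

lemma pvOcc_ge (l : List Char) (n : Int) (ch : Char) :
    ∀ i ∈ pvOcc l n ch, n ≤ i := by
  induction l generalizing n with
  | nil => simp [pvOcc]
  | cons c t ih =>
    intro i hi
    by_cases h : c = ch
    · simp only [pvOcc, if_pos h, List.mem_cons] at hi
      rcases hi with rfl | hi
      · exact le_refl _
      · have := ih (n + 1) i hi; omega
    · simp only [pvOcc, if_neg h] at hi
      have := ih (n + 1) i hi; omega

lemma pvOcc_nil_iff (l : List Char) (n : Int) (ch : Char) :
    pvOcc l n ch = [] ↔ l.contains ch = false := by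
  induction l generalizing n with
  | nil => simp [pvOcc]
  | cons c t ih =>
    by_cases h : c = ch <;> simp [pvOcc, h, ih (n + 1), Ne.symm]

-- exactly one ')' in l ↔ partition at ')' finds one and there is none after it
lemma pvOcc_one_iff (l : List Char) (n : Int) (ch : Char) :
    (pvOcc l n ch).length = 1 ↔
      ((pvPartition l ch).2.1 = true ∧ (pvPartition l ch).2.2.contains ch = false) := by
  induction l generalizing n with
  | nil => simp [pvOcc, pvPartition]
  | cons c t ih =>
    by_cases h : c = ch
    · simp only [pvOcc, pvPartition, if_pos h, List.length_cons]
      rw [show (pvOcc t (n + 1) ch).length + 1 = 1 ↔ pvOcc t (n + 1) ch = [] from by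
        rw [← List.length_eq_zero_iff]; omega]
      rw [pvOcc_nil_iff t (n + 1) ch]
      simp
    · simp only [pvOcc, pvPartition, if_neg h]
      exact ih (n + 1)

-- the main per-candidate equivalence: A's condition on the occurrence lists = pvOk's split test
lemma pvCore_eq (l : List Char) (n : Int) :
    (decide ((pvOcc l n '(').length = 0 ∧ (pvOcc l n ')').length = 0) ||
     decide ((pvOcc l n '(').length = 1 ∧ (pvOcc l n ')').length = 1 ∧
       PySem.List.pyGetD (pvOcc l n '(') 0 0 < PySem.List.pyGetD (pvOcc l n ')') 0 0)) =
    (let r := pvPartition l '('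
     if !r.2.1 then !(l.contains ')')
     else
       let r2 := pvPartition r.2.2 ')'
       !(r.1.contains ')') && !(r.2.2.contains '(') && r2.2.1 && !(r2.2.2.contains ')')) := by
  induction l generalizing n with
  | nil => simp [pvOcc, pvPartition]
  | cons c t ih =>
    by_cases ho : c = '('
    · -- first '(' found here: every later index is > n
      subst ho
      have e1 : pvOcc ('(' :: t) n '(' = n :: pvOcc t (n + 1) '(' := by simp [pvOcc]
      have e2 : pvOcc ('(' :: t) n ')' = pvOcc t (n + 1) ')' := by simp [pvOcc]
      have e3 : pvPartition ('(' :: t) '(' = ([], true, t) := by simp [pvPartition]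
      rw [e1, e2, e3]
      simp only [Bool.not_true, Bool.false_eq_true, if_false, List.contains_nil,
        Bool.not_false, Bool.true_and]
      rw [Bool.eq_iff_iff]
      simp only [Bool.or_eq_true, decide_eq_true_eq, Bool.and_eq_true, Bool.not_eq_true']
      rw [← pvOcc_nil_iff t (n + 1) '(', and_assoc, ← pvOcc_one_iff t (n + 1) ')']
      constructor
      · rintro (⟨h1, _⟩ | ⟨h1, h2, _⟩)
        · simp at h1
        · exact ⟨List.length_eq_zero_iff.mp (by simpa using h1), h2⟩
      · rintro ⟨h1, h2⟩
        refine Or.inr ⟨by simp [h1], h2, ?_⟩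
        rcases hc : pvOcc t (n + 1) ')' with _ | ⟨j, u⟩
        · rw [hc] at h2; simp at h2
        · have hj : n + 1 ≤ j := pvOcc_ge t (n + 1) ')' j (by rw [hc]; exact List.mem_cons_self ..)
          simp [h1, PySem.List.pyGetD]
          omega
    · by_cases hc : c = ')'
      · -- a ')' before any '(': both sides are false
        subst hc
        have e1 : pvOcc (')' :: t) n '(' = pvOcc t (n + 1) '(' := by simp [pvOcc]
        have e2 : pvOcc (')' :: t) n ')' = n :: pvOcc t (n + 1) ')' := by simp [pvOcc]
        have e3 : pvPartition (')' :: t) '(' =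
            (')' :: (pvPartition t '(').1, (pvPartition t '(').2.1, (pvPartition t '(').2.2) := by
          simp [pvPartition]
        rw [e1, e2, e3]
        have hRHS : (let r := (')' :: (pvPartition t '(').1, (pvPartition t '(').2.1,
              (pvPartition t '(').2.2)
            if !r.2.1 then !((')' :: t).contains ')')
            else
              let r2 := pvPartition r.2.2 ')'
              !(r.1.contains ')') && !(r.2.2.contains '(') && r2.2.1 &&
                !(r2.2.2.contains ')')) = false := by
          rcases hpt : (pvPartition t '(') with ⟨a, f, b⟩
          cases f <;> simp
        rw [hRHS]
        simp only [Bool.or_eq_false_iff, decide_eq_false_iff_not]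
        constructor
        · rintro ⟨_, h2⟩; simp at h2
        · rintro ⟨h1, h2, h3⟩
          rcases hocc : pvOcc t (n + 1) '(' with _ | ⟨i, u⟩
          · rw [hocc] at h1; simp at h1
          · have hi : n + 1 ≤ i :=
              pvOcc_ge t (n + 1) '(' i (by rw [hocc]; exact List.mem_cons_self ..)
            rw [hocc] at h1 h3
            rcases u with _ | _
            · simp [PySem.List.pyGetD] at h3; omega
            · simp at h1
      · -- ordinary character: both sides reduce to the tail
        have e1 : pvOcc (c :: t) n '(' = pvOcc t (n + 1) '(' := by simp [pvOcc, ho]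
        have e2 : pvOcc (c :: t) n ')' = pvOcc t (n + 1) ')' := by simp [pvOcc, hc]
        have e3 : pvPartition (c :: t) '(' =
            (c :: (pvPartition t '(').1, (pvPartition t '(').2.1, (pvPartition t '(').2.2) := by
          simp [pvPartition, ho]
        rw [e1, e2, e3, ih (n + 1)]
        have hc' : ¬ ')' = c := fun e => hc e.symm
        rcases hpt : (pvPartition t '(') with ⟨a, f, b⟩
        cases f <;> simp [hc']

lemma pvStep_eq (passed : List String) (c : String) :
    (let opens := find_occurrences c.toList '('
     let closes := find_occurrences c.toList ')'
     if opens.length = 0 ∧ closes.length = 0 then passed ++ [c]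
     else if opens.length = 1 ∧ closes.length = 1 ∧
         PySem.List.pyGetD opens 0 0 < PySem.List.pyGetD closes 0 0 then passed ++ [c]
     else passed) = if pvOk c then passed ++ [c] else passed := by
  simp only [find_occurrences, find_occ_eq]
  have h : (decide ((pvOcc c.toList 0 '(').length = 0 ∧ (pvOcc c.toList 0 ')').length = 0) ||
      decide ((pvOcc c.toList 0 '(').length = 1 ∧ (pvOcc c.toList 0 ')').length = 1 ∧
        PySem.List.pyGetD (pvOcc c.toList 0 '(') 0 0 <
          PySem.List.pyGetD (pvOcc c.toList 0 ')') 0 0)) = pvOk c := pvCore_eq c.toList 0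
  by_cases hk : pvOk c = true
  · rw [hk] at h
    simp only [Bool.or_eq_true, decide_eq_true_eq] at h
    rw [if_pos hk]
    rcases h with h1 | h2
    · rw [if_pos h1]
    · obtain ⟨hx, hy, hz⟩ := h2
      rw [if_neg (by rintro ⟨a, b⟩; omega), if_pos ⟨hx, hy, hz⟩]
  · rw [Bool.not_eq_true] at hk
    rw [hk] at h
    simp only [Bool.or_eq_false_iff, decide_eq_false_iff_not] at h
    rw [if_neg h.1, if_neg h.2, hk]
    simp

-- ===== VERDICT (by name: the statement is the Claim_ definition above) =====
theorem filter_on_number_contains_maximum_one_parenthesis_pair_spec : Claim_equal_filter_on_number_contains_maximum_one_parenthesis_pair := by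
  intro cands _
  unfold Spec_filter_on_number_contains_maximum_one_parenthesis_pair
  unfold filter_on_number_contains_maximum_one_parenthesis_pair
  unfold filter_on_number_contains_maximum_one_parenthesis_pair_alt
  congr 1
  funext passed c
  exact pvStep_eq passed c
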